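-- pv_equiv track=rewrite | github.com/VAndrejeus/sage-ch | collector/ai/remediation_response_parser.py | _contains_placeholder
-- ===== SOURCE A (Python) =====
-- def _contains_placeholder(command: str) -> bool:
--     lowered = command.lower()
--     return any(
--         token in lowered
--         for token in (
--             "<",
--             ">",
--             "your_domain",
--             "domain_name",
--             "yourdomain",
--             ".local",
--             "example",
--             "placeholder",
--         )
--     )
-- ===== SOURCE B (Python) =====
-- # B: build a first-child/next-sibling trie of the tokens once; scan the string
-- # walking the trie at each position instead of running eight substring searches.
-- _TOKENS = ("<", ">", "your_domain", "domain_name", "yourdomain", ".local",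
--            "example", "placeholder")
--
--
-- class _Node:
--     __slots__ = ("ch", "terminal", "child", "sib")
--
--     def __init__(self, ch, terminal, child, sib):
--         self.ch = ch
--         self.terminal = terminal
--         self.child = child
--         self.sib = sib
--
--
-- def _fresh(word):
--     # a chain of nodes spelling out `word`
--     if not word:
--         return None
--     return _Node(word[0], len(word) == 1, _fresh(word[1:]), None)
--
--
-- def _insert(node, word):
--     if not word:
--         return node
--     if node is None:
--         return _fresh(word)
--     if node.ch == word[0]:
--         rest = word[1:]
--         return _Node(node.ch, node.terminal or not rest,
--                      _insert(node.child, rest), node.sib)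
--     return _Node(node.ch, node.terminal, node.child, _insert(node.sib, word))
--
--
-- def _build_trie(tokens):
--     root = None
--     for t in tokens:
--         root = _insert(root, t)
--     return root
--
--
-- _TRIE = _build_trie(_TOKENS)
--
--
-- def _match_from(node, s, i):
--     # does some trie word start at position i of s?
--     if i >= len(s) or node is None:
--         return False
--     if node.ch == s[i]:
--         return node.terminal or _match_from(node.child, s, i + 1)
--     return _match_from(node.sib, s, i)
--
--
-- def _contains_placeholder(command: str) -> bool:
--     lowered = command.lower()
--     for i in range(len(lowered)):
--         if _match_from(_TRIE, lowered, i):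
--             return True
--     return False
-- ===== Notes on version B (the rewrite author's own statement) =====
-- stated objective: alternative
-- what changed: Replaced eight independent substring scans by a trie (first-child/next-sibling) built once from the tokens and a single left-to-right pass that walks the trie at each position, so shared token prefixes ('your'/'yourdomain') are matched once.
import Mathlib
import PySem

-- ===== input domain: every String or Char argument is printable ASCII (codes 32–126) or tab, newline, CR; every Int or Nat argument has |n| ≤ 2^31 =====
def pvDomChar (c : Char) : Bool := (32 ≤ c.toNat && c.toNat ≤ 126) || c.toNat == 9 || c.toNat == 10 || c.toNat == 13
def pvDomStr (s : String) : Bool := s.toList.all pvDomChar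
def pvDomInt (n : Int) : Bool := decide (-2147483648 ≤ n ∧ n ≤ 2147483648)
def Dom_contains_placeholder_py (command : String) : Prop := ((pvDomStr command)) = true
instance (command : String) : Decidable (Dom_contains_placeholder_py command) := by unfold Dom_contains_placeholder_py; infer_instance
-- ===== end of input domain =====

-- ===== PORT A =====
-- B builds a first-child/next-sibling trie of the tokens once and walks it at each
-- position instead of running eight independent substring scans; same result, proved equal.
def contains_placeholder_py (command : String) : Bool :=
  let lowered := PySem.Str.lower command
  (["<", ">", "your_domain", "domain_name", "yourdomain", ".local", "example",
    "placeholder"]).any (fun token => PySem.Str.isIn token lowered)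

-- ===== PORT B =====
-- first-child/next-sibling trie node (Python's _Node; Node.nil = Python's None)
inductive Node where
  | nil : Node
  | node : Char → Bool → Node → Node → Node
deriving DecidableEq, Repr

def pvTokens : List (List Char) :=
  ["<".toList, ">".toList, "your_domain".toList, "domain_name".toList,
   "yourdomain".toList, ".local".toList, "example".toList, "placeholder".toList]

-- Python _fresh: a chain of nodes spelling out `word`
def pvFresh : List Char → Node
  | [] => Node.nil
  | c :: r => Node.node c r.isEmpty (pvFresh r) Node.nil

-- Python _insert
def pvInsert : Node → List Char → Node
  | ns, [] => ns
  | Node.nil, w => pvFresh w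
  | Node.node d t ch sib, c :: r =>
      if d = c then Node.node d (t || r.isEmpty) (pvInsert ch r) sib
      else Node.node d t ch (pvInsert sib (c :: r))

-- Python _build_trie
def pvBuildTrie (tokens : List (List Char)) : Node :=
  tokens.foldl pvInsert Node.nil

def pvTrie : Node := pvBuildTrie pvTokens

-- Python _match_from: does some trie word start at the head of s?
def pvMatchFrom : Node → List Char → Bool
  | _, [] => false
  | Node.nil, _ => false
  | Node.node d t ch sib, x :: xs =>
      if d = x then t || pvMatchFrom ch xs else pvMatchFrom sib (x :: xs)

-- the position loop of _contains_placeholder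
def pvScanB (trie : Node) : List Char → Bool
  | [] => false
  | c :: rest => pvMatchFrom trie (c :: rest) || pvScanB trie rest

def contains_placeholder_py_alt (command : String) : Bool :=
  pvScanB pvTrie (PySem.Chars.lower command.toList)

-- ===== PRECONDITION & SPEC =====
def Spec_contains_placeholder_py (command : String) (out : Bool) : Prop := out = contains_placeholder_py_alt command
instance (command : String) (out : Bool) : Decidable (Spec_contains_placeholder_py command out) := by unfold Spec_contains_placeholder_py; infer_instance

-- ===== CLAIM (what is proved, stated in full; the proofs are below) =====
def Claim_equal_contains_placeholder_py : Prop := ∀ (command : String), Dom_contains_placeholder_py command → Spec_contains_placeholder_py command (contains_placeholder_py command)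

-- ===== LEMMAS AND PROOFS =====

lemma pvMatchFrom_fresh (w : List Char) (hw : w ≠ []) :
    ∀ s, pvMatchFrom (pvFresh w) s = w.isPrefixOf s := by
  induction w with
  | nil => exact absurd rfl hw
  | cons c r ih =>
    intro s
    cases s with
    | nil => simp [pvFresh, pvMatchFrom, List.isPrefixOf]
    | cons x xs =>
      simp only [pvFresh, pvMatchFrom, List.isPrefixOf]
      by_cases hcx : c = x
      · subst hcx
        simp only [beq_self_eq_true, Bool.true_and]
        cases r with
        | nil => simp [List.isEmpty, List.isPrefixOf]
        | cons y ys => simp [List.isEmpty, ih (by simp) xs]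
      · simp [hcx, beq_eq_false_iff_ne.mpr hcx]

lemma pvMatchFrom_insert (ns : Node) :
    ∀ (w : List Char), w ≠ [] → ∀ s,
      pvMatchFrom (pvInsert ns w) s = (pvMatchFrom ns s || w.isPrefixOf s) := by
  induction ns with
  | nil =>
    intro w hw s
    cases w with
    | nil => exact absurd rfl hw
    | cons c r =>
      rw [show pvInsert Node.nil (c :: r) = pvFresh (c :: r) from rfl,
          pvMatchFrom_fresh (c :: r) hw s]
      cases s <;> simp [pvMatchFrom]
  | node d t ch sib ihch ihsib =>
    intro w hw s
    cases w with
    | nil => exact absurd rfl hw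
    | cons c r =>
      simp only [pvInsert]
      by_cases hdc : d = c
      · subst hdc
        simp only [ite_true, if_pos]
        cases s with
        | nil => simp [pvMatchFrom, List.isPrefixOf]
        | cons x xs =>
          by_cases hdx : d = x
          · subst hdx
            cases r with
            | nil => simp [pvMatchFrom, pvInsert, List.isPrefixOf]
            | cons y ys =>
              simp only [pvMatchFrom, List.isEmpty, List.isPrefixOf,
                beq_self_eq_true, Bool.true_and, ite_true]
              rw [ihch (y :: ys) (by simp) xs]
              simp [Bool.or_assoc]
          · simp [pvMatchFrom, hdx, List.isPrefixOf, beq_eq_false_iff_ne.mpr hdx]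
      · simp only [if_neg hdc]
        cases s with
        | nil => simp [pvMatchFrom, List.isPrefixOf]
        | cons x xs =>
          simp only [pvMatchFrom]
          by_cases hdx : d = x
          · subst hdx
            have hcx : (c == d) = false := beq_eq_false_iff_ne.mpr fun h => hdc h.symm
            simp [List.isPrefixOf, hcx]
          · simp only [if_neg hdx]
            rw [ihsib (c :: r) hw (x :: xs)]

lemma pvMatchFrom_foldl (ws : List (List Char)) (hws : ∀ w ∈ ws, w ≠ []) :
    ∀ (t : Node) (s : List Char),
      pvMatchFrom (ws.foldl pvInsert t) s
        = (pvMatchFrom t s || ws.any (fun w => w.isPrefixOf s)) := by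
  induction ws with
  | nil => intro t s; simp
  | cons w ws ih =>
    intro t s
    simp only [List.foldl_cons, List.any_cons]
    rw [ih (fun u hu => hws u (List.mem_cons_of_mem _ hu)) (pvInsert t w) s,
        pvMatchFrom_insert t w (hws w (List.mem_cons_self)) s]
    simp [Bool.or_assoc]

lemma pvMatchFrom_trie (s : List Char) :
    pvMatchFrom pvTrie s = pvTokens.any (fun w => w.isPrefixOf s) := by
  rw [show pvTrie = pvTokens.foldl pvInsert Node.nil from rfl,
      pvMatchFrom_foldl pvTokens (by decide) Node.nil s]
  cases s <;> simp [pvMatchFrom]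

lemma pvScanB_iff (s : List Char) :
    pvScanB pvTrie s = true ↔ ∃ t ∈ pvTokens, t <:+: s := by
  induction s with
  | nil =>
    simp only [pvScanB, Bool.false_eq_true, false_iff]
    rintro ⟨t, ht, hi⟩
    rw [List.infix_nil] at hi
    subst hi
    revert ht
    decide
  | cons c rest ih =>
    simp only [pvScanB, Bool.or_eq_true, pvMatchFrom_trie, List.any_eq_true,
      List.isPrefixOf_iff_prefix, ih]
    constructor
    · rintro (⟨t, ht, hp⟩ | ⟨t, ht, hi⟩)
      · exact ⟨t, ht, hp.isInfix⟩
      · exact ⟨t, ht, hi.trans (List.suffix_cons c rest).isInfix⟩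
    · rintro ⟨t, ht, hi⟩
      rcases List.infix_cons_iff.mp hi with hp | hi'
      · exact Or.inl ⟨t, ht, hp⟩
      · exact Or.inr ⟨t, ht, hi'⟩

-- ===== VERDICT (by name: the statement is the Claim_ definition above) =====
theorem contains_placeholder_py_spec : Claim_equal_contains_placeholder_py := by
  intro command _
  show _ = _
  unfold contains_placeholder_py contains_placeholder_py_alt
  rw [Bool.eq_iff_iff, pvScanB_iff]
  simp [pvTokens, PySem.Chars.isIn_iff_infix, PySem.Str.toList_lower]
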